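-- pv_equiv track=rewrite | github.com/GatoaoCubo/cex | _tools/cex_skill_autocreate.py | derive_prerequisites
-- ===== SOURCE A (Python) =====
-- from typing import Any
--
-- def derive_prerequisites(calls: list[dict[str, Any]]) -> list[str]:
--     """Infer prerequisites from tool names."""
--     tool_names = {c.get("tool") or c.get("tool_name", "") for c in calls}
--     prereqs: list[str] = []
--     if any("git" in t.lower() for t in tool_names):
--         prereqs.append("git repository initialized")
--     if any("python" in t.lower() or "bash" in t.lower() for t in tool_names):
--         prereqs.append("Python 3.10+ available")
--     if any("compile" in t.lower() for t in tool_names):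
--         prereqs.append("cex_compile.py accessible")
--     if not prereqs:
--         prereqs.append("CEX repo context")
--     return prereqs
-- ===== SOURCE B (Python) =====
-- def derive_prerequisites(calls):
--     """Infer prerequisites from tool names (single fused pass maintaining three flags)."""
--     has_git = has_py = has_compile = False
--     for c in calls:
--         name = (c.get("tool") or c.get("tool_name", "")).lower()
--         has_git = has_git or "git" in name
--         has_py = has_py or "python" in name or "bash" in name
--         has_compile = has_compile or "compile" in name
--     prereqs = []
--     if has_git:
--         prereqs.append("git repository initialized")
--     if has_py:
--         prereqs.append("Python 3.10+ available")
--     if has_compile: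
--         prereqs.append("cex_compile.py accessible")
--     return prereqs or ["CEX repo context"]
-- ===== Notes on version B (the rewrite author's own statement) =====
-- stated objective: simpler
-- what changed: Replaces A's build-a-set-then-scan-it-three-times structure with one fused pass over calls that maintains three boolean flags, eliminating the intermediate set entirely.
import Mathlib
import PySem

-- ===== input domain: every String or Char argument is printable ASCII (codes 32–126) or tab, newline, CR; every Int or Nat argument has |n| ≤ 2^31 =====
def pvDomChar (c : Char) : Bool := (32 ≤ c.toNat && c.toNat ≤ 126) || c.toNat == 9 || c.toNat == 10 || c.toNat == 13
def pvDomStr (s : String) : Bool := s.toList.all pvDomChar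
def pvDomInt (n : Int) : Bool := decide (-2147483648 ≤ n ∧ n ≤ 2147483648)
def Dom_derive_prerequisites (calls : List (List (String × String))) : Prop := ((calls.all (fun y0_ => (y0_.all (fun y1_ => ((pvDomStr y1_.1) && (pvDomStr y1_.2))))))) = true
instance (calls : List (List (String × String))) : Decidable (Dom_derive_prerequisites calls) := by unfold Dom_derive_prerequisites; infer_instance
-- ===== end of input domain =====

-- B replaces A's "build a set of tool names, then scan it three times" with one fused pass
-- over calls maintaining three boolean flags (objective: simpler).


-- ===== PORT A =====
-- c.get("tool") or c.get("tool_name", "")  (a missing key or an empty string is falsy)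
def pvToolName (c : List (String × String)) : String :=
  match PySem.Dict.get? (PySem.Dict.mk c) "tool" with
  | some v => if v = "" then PySem.Dict.getD (PySem.Dict.mk c) "tool_name" "" else v
  | none => PySem.Dict.getD (PySem.Dict.mk c) "tool_name" ""

def derive_prerequisites (calls : List (List (String × String))) : List String :=
  let tool_names : PySem.Set String := PySem.Set.ofList (calls.map pvToolName)
  let prereqs : List String := []
  let prereqs := if tool_names.any (fun t => PySem.Str.isIn "git" (PySem.Str.lower t))
    then prereqs ++ ["git repository initialized"] else prereqs
  let prereqs := if tool_names.any (fun t => PySem.Str.isIn "python" (PySem.Str.lower t) || PySem.Str.isIn "bash" (PySem.Str.lower t))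
    then prereqs ++ ["Python 3.10+ available"] else prereqs
  let prereqs := if tool_names.any (fun t => PySem.Str.isIn "compile" (PySem.Str.lower t))
    then prereqs ++ ["cex_compile.py accessible"] else prereqs
  if prereqs = [] then prereqs ++ ["CEX repo context"] else prereqs

-- ===== PORT B =====
def derive_prerequisites_alt (calls : List (List (String × String))) : List String :=
  let flags : Bool × Bool × Bool := calls.foldl
    (fun (f : Bool × Bool × Bool) c =>
      let name := PySem.Str.lower (pvToolName c)
      (f.1 || PySem.Str.isIn "git" name,
       f.2.1 || PySem.Str.isIn "python" name || PySem.Str.isIn "bash" name,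
       f.2.2 || PySem.Str.isIn "compile" name))
    (false, false, false)
  let prereqs : List String := []
  let prereqs := if flags.1 then prereqs ++ ["git repository initialized"] else prereqs
  let prereqs := if flags.2.1 then prereqs ++ ["Python 3.10+ available"] else prereqs
  let prereqs := if flags.2.2 then prereqs ++ ["cex_compile.py accessible"] else prereqs
  if prereqs = [] then ["CEX repo context"] else prereqs

-- ===== PRECONDITION & SPEC =====
def Spec_derive_prerequisites (calls : List (List (String × String))) (out : List String) : Prop := out = derive_prerequisites_alt calls
instance (calls : List (List (String × String))) (out : List String) : Decidable (Spec_derive_prerequisites calls out) := by unfold Spec_derive_prerequisites; infer_instance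

-- ===== CLAIM (what is proved, stated in full; the proofs are below) =====
def Claim_equal_derive_prerequisites : Prop := ∀ (calls : List (List (String × String))), Dom_derive_prerequisites calls → Spec_derive_prerequisites calls (derive_prerequisites calls)

-- ===== LEMMAS AND PROOFS =====

-- any over set(xs) = any over xs (any is order- and multiplicity-independent)
theorem pv_any_ofList {α : Type} [DecidableEq α] (xs : List α) (p : α → Bool) :
    (PySem.Set.ofList xs).any p = xs.any p := by
  rw [Bool.eq_iff_iff]
  simp only [List.any_eq_true]
  constructor
  · rintro ⟨x, hx, hp⟩; exact ⟨x, (PySem.Set.mem_ofList _ _).1 hx, hp⟩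
  · rintro ⟨x, hx, hp⟩; exact ⟨x, (PySem.Set.mem_ofList _ _).2 hx, hp⟩

-- B's fused fold computes the three 'any's over the mapped names
theorem pv_flags_fold (calls : List (List (String × String))) (g p c : Bool) :
    calls.foldl
      (fun (f : Bool × Bool × Bool) c =>
        let name := PySem.Str.lower (pvToolName c)
        (f.1 || PySem.Str.isIn "git" name,
         f.2.1 || PySem.Str.isIn "python" name || PySem.Str.isIn "bash" name,
         f.2.2 || PySem.Str.isIn "compile" name))
      (g, p, c)
    = (g || (calls.map pvToolName).any (fun t => PySem.Str.isIn "git" (PySem.Str.lower t)),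
       p || (calls.map pvToolName).any (fun t => PySem.Str.isIn "python" (PySem.Str.lower t) || PySem.Str.isIn "bash" (PySem.Str.lower t)),
       c || (calls.map pvToolName).any (fun t => PySem.Str.isIn "compile" (PySem.Str.lower t))) := by
  induction calls generalizing g p c with
  | nil => simp
  | cons hd tl ih =>
    simp only [List.foldl_cons, List.map_cons, List.any_cons, ih]
    simp [Bool.or_assoc]

-- ===== VERDICT (by name: the statement is the Claim_ definition above) =====
theorem derive_prerequisites_spec : Claim_equal_derive_prerequisites := by
  intro calls _
  unfold Spec_derive_prerequisites derive_prerequisites derive_prerequisites_alt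
  rw [pv_flags_fold]
  simp only [Bool.false_or, pv_any_ofList]
  cases hg : (calls.map pvToolName).any (fun t => PySem.Str.isIn "git" (PySem.Str.lower t)) <;>
  cases hp : (calls.map pvToolName).any (fun t => PySem.Str.isIn "python" (PySem.Str.lower t) || PySem.Str.isIn "bash" (PySem.Str.lower t)) <;>
  cases hc : (calls.map pvToolName).any (fun t => PySem.Str.isIn "compile" (PySem.Str.lower t)) <;>
  simp
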